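-- pv_equiv track=rewrite | github.com/joshanashakya/dissertation | workspace/dataset/java-python/GeeksForGeeks/4138/A/2.py | countStrs
-- ===== SOURCE A (Python) =====
-- def countStrs(n):
--
--     # Initializing arr[n+1][27] to 0
--     dp = [[0 for j in range(27)]
--              for i in range(n + 1)]
--
--     # Initialing 1st row all 1 from 0 to 25
--     for i in range(0, 26):
--         dp[1][i] = 1
--
--     # Begin evaluating from i=2 since
--     # 1st row is set
--     for i in range(2, n + 1):
--         for j in range(0, 26):
--
--             # j=0 is 'A' which can make strings
--             # of length i using strings of length
--             # i-1 and starting with 'B'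
--             if(j == 0):
--                 dp[i][j] = dp[i - 1][j + 1];
--             else:
--                 dp[i][j] = (dp[i - 1][j - 1] +
--                             dp[i - 1][j + 1])
--
--     # Our result is sum of last row.
--     sum = 0
--     for i in range(0, 26):
--         sum = sum + dp[n][i]
--
--     return sum
-- ===== SOURCE B (Python) =====
-- def countStrs(n):
--     # Walks on the path graph A..Z: multiply the all-ones vector by the
--     # 26x26 adjacency matrix raised to the (n-1)-th power, by binary
--     # exponentiation.
--     size = 26
--
--     def mat_mult(A, B):
--         return [[sum(A[i][k] * B[k][j] for k in range(size))
--                  for j in range(size)] for i in range(size)]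
--
--     def vec_mult(v, M):
--         return [sum(v[k] * M[k][j] for k in range(size))
--                 for j in range(size)]
--
--     M = [[1 if abs(i - j) == 1 else 0 for j in range(size)]
--          for i in range(size)]
--     v = [1] * size
--     e = n - 1
--     while e > 0:
--         if e % 2 == 1:
--             v = vec_mult(v, M)
--         M = mat_mult(M, M)
--         e //= 2
--     return sum(v)
-- ===== Notes on version B (the rewrite author's own statement) =====
-- stated objective: alternative
-- what changed: B replaces A's n-row DP table with binary exponentiation of the 26x26 path-adjacency matrix applied to the all-ones vector (O(26^3 log n) arithmetic operations instead of O(26 n)); since the result itself has ~n bits, big-integer arithmetic dominates and measured cost stays comparable.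
-- outside the precondition, e.g. on countStrs(0): A raises IndexError, B returns 26; on countStrs(-2): A raises IndexError, B returns 26
import Mathlib
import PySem

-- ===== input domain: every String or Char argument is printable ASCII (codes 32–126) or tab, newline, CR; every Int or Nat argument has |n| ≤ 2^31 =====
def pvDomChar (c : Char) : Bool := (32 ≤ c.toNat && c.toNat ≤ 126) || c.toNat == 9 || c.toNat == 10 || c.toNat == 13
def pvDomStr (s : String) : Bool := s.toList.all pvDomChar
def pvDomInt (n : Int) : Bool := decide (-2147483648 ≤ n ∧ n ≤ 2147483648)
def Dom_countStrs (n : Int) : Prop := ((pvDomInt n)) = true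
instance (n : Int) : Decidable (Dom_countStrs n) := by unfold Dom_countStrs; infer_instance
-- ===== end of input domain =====

-- B replaces A's row-by-row DP table with binary exponentiation of the 26×26
-- path-adjacency matrix applied to the all-ones vector: a genuinely different
-- algorithm of comparable measured cost (the result's digit count grows with n,
-- so big-integer arithmetic dominates both).

-- ===== PORT A =====
-- dp is Python's list of n+1 rows of 27 ints; dp[i][j] = x is set2, dp[i][j] is get2
-- (in range wherever Python executes them under Pre_).
def get2 (dp : List (List Int)) (i j : Nat) : Int := (dp.getD i []).getD j 0

def set2 (dp : List (List Int)) (i j : Nat) (x : Int) : List (List Int) :=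
  dp.set i ((dp.getD i []).set j x)

-- range(2, n+1) = List.range' 2 (n-1) for n ≥ 1
def countStrs (n : Int) : Int :=
  let N : Nat := n.toNat
  let dp : List (List Int) := List.replicate (N+1) (List.replicate 27 0)
  let dp := (List.range 26).foldl (fun dp i => set2 dp 1 i 1) dp
  let dp := (List.range' 2 (N - 1)).foldl
    (fun dp i =>
      (List.range 26).foldl
        (fun dp j =>
          if j = 0 then set2 dp i j (get2 dp (i-1) (j+1))
          else set2 dp i j (get2 dp (i-1) (j-1) + get2 dp (i-1) (j+1)))
        dp)
    dp
  (List.range 26).foldl (fun s i => s + get2 dp N i) 0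

-- ===== PORT B =====
def matGet (M : List (List Int)) (i j : Nat) : Int := (M.getD i []).getD j 0

def matMul (A B : List (List Int)) : List (List Int) :=
  (List.range 26).map (fun i => (List.range 26).map (fun j =>
    ((List.range 26).map (fun k => matGet A i k * matGet B k j)).sum))

def vecMul (v : List Int) (M : List (List Int)) : List Int :=
  (List.range 26).map (fun j =>
    ((List.range 26).map (fun k => v.getD k 0 * matGet M k j)).sum)

-- adjacency matrix of the path A..Z: entry 1 iff abs(i-j) == 1
def adjM : List (List Int) :=
  (List.range 26).map (fun (i : Nat) => (List.range 26).map (fun (j : Nat) =>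
    if ((i : Int) - (j : Int)).natAbs = 1 then (1 : Int) else 0))

-- the while-loop of Source B: binary exponentiation, multiplying v in when the bit is set
def powLoop (v : List Int) (M : List (List Int)) (e : Nat) : List Int :=
  if h : e = 0 then v
  else powLoop (if e % 2 = 1 then vecMul v M else v) (matMul M M) (e / 2)
termination_by e
decreasing_by exact Nat.div_lt_self (Nat.pos_of_ne_zero h) one_lt_two

def countStrs_alt (n : Int) : Int :=
  (powLoop (List.replicate 26 1) adjM (n - 1).toNat).sum

-- ===== PRECONDITION & SPEC =====
-- Pre_ excludes n ≤ 0, where the Python A raises IndexError (dp[1] does not exist).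
def Pre_countStrs (n : Int) : Prop := 1 ≤ n
instance (n : Int) : Decidable (Pre_countStrs n) := by unfold Pre_countStrs; infer_instance
def pvWitness_countStrs : Int := 3

def Spec_countStrs (n : Int) (out : Int) : Prop := out = countStrs_alt n
instance (n : Int) (out : Int) : Decidable (Spec_countStrs n out) := by unfold Spec_countStrs; infer_instance

-- ===== CLAIM (what is proved, stated in full; the proofs are below) =====
def Claim_equal_countStrs : Prop := ∀ (n : Int), Dom_countStrs n → Pre_countStrs n → Spec_countStrs n (countStrs n)

-- ===== LEMMAS AND PROOFS =====

-- the ideal DP rows: g i j = dp[i][j] (0 for out-of-range j, matching the unwritten 27th column)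
def g : Nat → Nat → Int
  | 0, _ => 0
  | 1, j => if j < 26 then 1 else 0
  | (i+2), j => if j = 0 then g (i+1) 1 else if j < 26 then g (i+1) (j-1) + g (i+1) (j+1) else 0

theorem g_ge26 (i j : Nat) (h : 26 ≤ j) : g i j = 0 := by
  match i with
  | 0 => rfl
  | 1 => simp [g]; omega
  | (k+2) => simp [g]; omega

theorem sum_map_range (n : Nat) (f : Nat → Int) :
    ((List.range n).map f).sum = ∑ k ∈ Finset.range n, f k := by
  induction n with
  | zero => simp
  | succ m ih => simp [List.range_succ, Finset.sum_range_succ, ih]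

theorem getD_map_range (n : Nat) (f : Nat → Int) (k : Nat) (d : Int) :
    ((List.range n).map f).getD k d = if k < n then f k else d := by
  rcases Nat.lt_or_ge k n with h | h
  · rw [List.getD_eq_getElem?_getD]
    simp [h]
  · rw [List.getD_eq_getElem?_getD]
    rw [List.getElem?_eq_none (by simpa using h)]
    simp; omega

theorem getD_map_range_list (n : Nat) (f : Nat → List Int) (k : Nat) :
    ((List.range n).map f).getD k [] = if k < n then f k else [] := by
  rcases Nat.lt_or_ge k n with h | h
  · rw [List.getD_eq_getElem?_getD]
    simp [h]
  · rw [List.getD_eq_getElem?_getD]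
    rw [List.getElem?_eq_none (by simpa using h)]
    simp; omega

theorem vecMul_getD (v : List Int) (M : List (List Int)) (j : Nat) (hj : j < 26) :
    (vecMul v M).getD j 0 = ∑ k ∈ Finset.range 26, v.getD k 0 * matGet M k j := by
  unfold vecMul
  rw [getD_map_range]
  simp [hj, sum_map_range]

theorem matGet_matMul (A B : List (List Int)) (k j : Nat) (hk : k < 26) (hj : j < 26) :
    matGet (matMul A B) k j = ∑ m ∈ Finset.range 26, matGet A k m * matGet B m j := by
  unfold matMul matGet
  rw [getD_map_range_list, if_pos hk, getD_map_range, if_pos hj, sum_map_range]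

theorem vecMul_assoc (v : List Int) (A B : List (List Int)) :
    vecMul (vecMul v A) B = vecMul v (matMul A B) := by
  unfold vecMul
  apply List.map_congr_left
  intro j hj
  rw [List.mem_range] at hj
  rw [sum_map_range, sum_map_range]
  calc ∑ m ∈ Finset.range 26, (vecMul v A).getD m 0 * matGet B m j
      = ∑ m ∈ Finset.range 26, ∑ k ∈ Finset.range 26,
          v.getD k 0 * matGet A k m * matGet B m j := by
        refine Finset.sum_congr rfl fun m hm => ?_
        rw [Finset.mem_range] at hm
        rw [vecMul_getD v A m hm, Finset.sum_mul]
    _ = ∑ k ∈ Finset.range 26, ∑ m ∈ Finset.range 26,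
          v.getD k 0 * (matGet A k m * matGet B m j) := by
        rw [Finset.sum_comm]
        exact Finset.sum_congr rfl fun k _ => Finset.sum_congr rfl fun m _ => by ring
    _ = ∑ k ∈ Finset.range 26, v.getD k 0 * matGet (matMul A B) k j := by
        refine Finset.sum_congr rfl fun k hk => ?_
        rw [Finset.mem_range] at hk
        rw [matGet_matMul A B k j hk hj, Finset.mul_sum]

-- iterated vector-matrix multiplication (what the while loop computes)
def applyN (M : List (List Int)) : Nat → List Int → List Int
  | 0, v => v
  | e+1, v => applyN M e (vecMul v M)

theorem applyN_double (M : List (List Int)) (k : Nat) :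
    ∀ v, applyN (matMul M M) k v = applyN M (2*k) v := by
  induction k with
  | zero => intro v; rfl
  | succ m ih =>
    intro v
    have h2 : 2*(m+1) = (2*m) + 1 + 1 := by omega
    rw [h2]
    show applyN (matMul M M) m (vecMul v (matMul M M)) =
         applyN M (2*m) (vecMul (vecMul v M) M)
    rw [ih, vecMul_assoc]

theorem powLoop_eq (e : Nat) : ∀ v M, powLoop v M e = applyN M e v := by
  induction e using Nat.strong_induction_on with
  | _ e ih =>
    intro v M
    by_cases h : e = 0
    · subst h; rw [powLoop]; rfl
    · rw [powLoop, dif_neg h,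
        ih (e/2) (Nat.div_lt_self (Nat.pos_of_ne_zero h) one_lt_two),
        applyN_double]
      by_cases hodd : e % 2 = 1
      · rw [if_pos hodd]
        have he : e = 2*(e/2) + 1 := by omega
        conv_rhs => rw [he]
        rfl
      · rw [if_neg hodd]
        have he : 2*(e/2) = e := by omega
        rw [he]

-- one step of the B-side vector iteration produces the next DP row
theorem neighbor_sum (f : Nat → Int) (j : Nat) (hj : j < 26) :
    (∑ k ∈ Finset.range 26,
      f k * (if ((k : Int) - (j : Int)).natAbs = 1 then (1:Int) else 0)) =
    (if 1 ≤ j then f (j-1) else 0) + (if j+1 < 26 then f (j+1) else 0) := by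
  have split : ∀ k ∈ Finset.range 26,
      f k * (if ((k : Int) - (j : Int)).natAbs = 1 then (1:Int) else 0) =
      (if k + 1 = j then f k else 0) + (if k = j + 1 then f k else 0) := by
    intro k _
    have hiff : (((k:Int) - (j:Int)).natAbs = 1) ↔ (k + 1 = j ∨ k = j + 1) := by omega
    by_cases h2 : k + 1 = j
    · rw [if_pos (hiff.mpr (Or.inl h2)), if_pos h2, if_neg (by omega)]; ring
    · by_cases h3 : k = j + 1
      · rw [if_pos (hiff.mpr (Or.inr h3)), if_neg h2, if_pos h3]; ring
      · rw [if_neg (fun h => by rcases hiff.mp h with h | h <;> omega), if_neg h2, if_neg h3]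
        ring
  rw [Finset.sum_congr rfl split, Finset.sum_add_distrib]
  congr 1
  · rcases Nat.eq_zero_or_pos j with hj0 | hj0
    · subst hj0; simp
    · obtain ⟨j', rfl⟩ : ∃ j', j = j' + 1 := ⟨j - 1, by omega⟩
      have : ∀ k ∈ Finset.range 26, (if k + 1 = j' + 1 then f k else 0) =
          (if k = j' then f k else 0) := by
        intro k _; split_ifs with h1 h2 h3 <;> first | rfl | omega
      rw [Finset.sum_congr rfl this, Finset.sum_ite_eq' (Finset.range 26) j' f]
      simp only [Finset.mem_range]
      rw [if_pos (by omega), if_pos (by omega)]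
      norm_num
  · rw [Finset.sum_ite_eq' (Finset.range 26) (j+1) f]
    simp only [Finset.mem_range]

theorem vec_step (i : Nat) (hi : 1 ≤ i) :
    vecMul ((List.range 26).map (g i)) adjM = (List.range 26).map (g (i+1)) := by
  unfold vecMul
  apply List.map_congr_left
  intro j hj
  rw [List.mem_range] at hj
  rw [sum_map_range]
  have hentry : ∀ k ∈ Finset.range 26,
      ((List.range 26).map (g i)).getD k 0 * matGet adjM k j =
      g i k * (if ((k : Int) - (j : Int)).natAbs = 1 then (1:Int) else 0) := by
    intro k hk
    rw [Finset.mem_range] at hk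
    simp [matGet, adjM, hk, hj]
  rw [Finset.sum_congr rfl hentry, neighbor_sum (g i) j hj]
  obtain ⟨k, rfl⟩ : ∃ k, i = k + 1 := ⟨i - 1, by omega⟩
  show _ = g (k+2) j
  rcases Nat.eq_zero_or_pos j with hj0 | hj0
  · subst hj0
    simp [g]
  · rw [if_pos (by omega : 1 ≤ j)]
    have hg : g (k+2) j = g (k+1) (j-1) + g (k+1) (j+1) := by
      show g (k+2) j = _
      rw [g]
      rw [if_neg (by omega), if_pos hj]
    rw [hg]
    by_cases hlt : j + 1 < 26
    · rw [if_pos hlt]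
    · rw [if_neg hlt, g_ge26 (k+1) (j+1) (by omega)]

theorem rows_eq (e : Nat) :
    applyN adjM e ((List.range 26).map (g 1)) = (List.range 26).map (g (e+1)) := by
  have gen : ∀ e i, 1 ≤ i →
      applyN adjM e ((List.range 26).map (g i)) = (List.range 26).map (g (i+e)) := by
    intro e
    induction e with
    | zero => intro i _; rfl
    | succ m ih =>
      intro i hi
      show applyN adjM m (vecMul ((List.range 26).map (g i)) adjM) = _
      rw [vec_step i hi, ih (i+1) (by omega)]
      have h : i + 1 + m = i + (m + 1) := by omega
      rw [h]
  have := gen e 1 (by omega)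
  rwa [Nat.add_comm] at this

theorem ones_eq : List.replicate 26 (1:Int) = (List.range 26).map (g 1) := by decide

-- ===== A-side: the three folds compute the rows g =====

def Shape (N : Nat) (dp : List (List Int)) : Prop :=
  dp.length = N + 1 ∧ ∀ a, a ≤ N → (dp.getD a []).length = 27

theorem getD_set (l : List Int) (i : Nat) (x : Int) (a : Nat) (d : Int) :
    (l.set i x).getD a d = if a = i ∧ i < l.length then x else l.getD a d := by
  rw [List.getD_eq_getElem?_getD, List.getD_eq_getElem?_getD, List.getElem?_set]
  by_cases h1 : i = a
  · subst h1
    by_cases h2 : i < l.length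
    · rw [if_pos rfl, if_pos h2, if_pos ⟨rfl, h2⟩]
      rfl
    · rw [if_pos rfl, if_neg h2, if_neg (by omega)]
      rw [List.getElem?_eq_none (by omega)]
  · rw [if_neg h1, if_neg (by omega)]

theorem row_set2 (dp : List (List Int)) (i j : Nat) (x : Int) (a : Nat) :
    (set2 dp i j x).getD a [] =
      if a = i ∧ i < dp.length then (dp.getD i []).set j x else dp.getD a [] := by
  unfold set2
  rw [List.getD_eq_getElem?_getD, List.getElem?_set]
  by_cases h1 : i = a
  · subst h1
    by_cases h2 : i < dp.length
    · rw [if_pos rfl, if_pos h2, if_pos ⟨rfl, h2⟩]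
      rfl
    · rw [if_pos rfl, if_neg h2, if_neg (by omega)]
      rw [List.getD_eq_getElem?_getD, List.getElem?_eq_none (by omega)]
  · rw [if_neg h1, if_neg (by omega), List.getD_eq_getElem?_getD]

theorem shape_set2 (N : Nat) (dp : List (List Int)) (i j : Nat) (x : Int)
    (h : Shape N dp) : Shape N (set2 dp i j x) := by
  obtain ⟨hlen, hrow⟩ := h
  refine ⟨by simpa [set2] using hlen, fun a ha => ?_⟩
  rw [row_set2]
  split_ifs with h1
  · rw [List.length_set]
    exact h1.1 ▸ hrow i (by omega)
  · exact hrow a ha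

theorem get2_set2 (N : Nat) (dp : List (List Int)) (i j : Nat) (x : Int)
    (h : Shape N dp) (hi : i ≤ N) (hj : j < 27) (a b : Nat) :
    get2 (set2 dp i j x) a b = if a = i ∧ b = j then x else get2 dp a b := by
  obtain ⟨hlen, hrow⟩ := h
  unfold get2
  rw [row_set2]
  by_cases ha : a = i
  · subst ha
    rw [if_pos ⟨rfl, by omega⟩, getD_set]
    rw [hrow a hi]
    split_ifs with h1 h2 h3 <;> first | rfl | omega
  · rw [if_neg (by tauto), if_neg (by tauto)]

theorem foldl_pres {α β : Type} (P : α → Prop) (step : α → β → α) (l : List β)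
    (hstep : ∀ dp x, P dp → P (step dp x)) : ∀ dp, P dp → P (l.foldl step dp) := by
  induction l with
  | nil => intro dp h; exact h
  | cons x xs ih => intro dp h; exact ih _ (hstep dp x h)

theorem initFold (N : Nat) (m : Nat) (hm : m ≤ 26) (dp0 : List (List Int))
    (h0 : Shape N dp0) (hN : 1 ≤ N) (a b : Nat) :
    get2 ((List.range m).foldl (fun dp i => set2 dp 1 i 1) dp0) a b
      = if a = 1 ∧ b < m then 1 else get2 dp0 a b := by
  induction m generalizing a b with
  | zero => simp
  | succ k ih =>
    rw [List.range_succ, List.foldl_append]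
    simp only [List.foldl_cons, List.foldl_nil]
    have hshape : Shape N ((List.range k).foldl (fun dp i => set2 dp 1 i 1) dp0) :=
      foldl_pres _ _ _ (fun dp x h => shape_set2 N dp 1 x 1 h) dp0 h0
    rw [get2_set2 N _ 1 k 1 hshape hN (by omega)]
    by_cases h : a = 1 ∧ b = k
    · rw [if_pos h, if_pos ⟨h.1, by omega⟩]
    · rw [if_neg h, ih (by omega)]
      split_ifs with h1 h2 h3 <;> first | rfl | omega

theorem innerFold (N : Nat) (i : Nat) (hi2 : 2 ≤ i) (hiN : i ≤ N)
    (dp : List (List Int)) (hsh : Shape N dp)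
    (hrow : ∀ b, get2 dp (i-1) b = g (i-1) b) (m : Nat) (hm : m ≤ 26) (a b : Nat) :
    get2 ((List.range m).foldl
      (fun dp j =>
        if j = 0 then set2 dp i j (get2 dp (i-1) (j+1))
        else set2 dp i j (get2 dp (i-1) (j-1) + get2 dp (i-1) (j+1)))
      dp) a b
      = if a = i ∧ b < m then g i b else get2 dp a b := by
  induction m generalizing a b with
  | zero => simp
  | succ k ih =>
    rw [List.range_succ, List.foldl_append]
    simp only [List.foldl_cons, List.foldl_nil]
    set dpk := (List.range k).foldl
      (fun dp j =>
        if j = 0 then set2 dp i j (get2 dp (i-1) (j+1))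
        else set2 dp i j (get2 dp (i-1) (j-1) + get2 dp (i-1) (j+1)))
      dp with hdpk
    have hk : ∀ a b, get2 dpk a b = if a = i ∧ b < k then g i b else get2 dp a b :=
      fun a b => ih (by omega) a b
    have hkshape : Shape N dpk := by
      rw [hdpk]
      refine foldl_pres _ _ _ (fun dp x h => ?_) dp hsh
      split_ifs <;> exact shape_set2 N dp i x _ h
    have hrow' : ∀ b, get2 dpk (i-1) b = g (i-1) b := by
      intro b
      rw [hk, if_neg (by omega)]
      exact hrow b
    obtain ⟨i', rfl⟩ : ∃ i', i = i' + 2 := ⟨i - 2, by omega⟩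
    by_cases hk0 : k = 0
    · subst hk0
      rw [if_pos rfl, get2_set2 N _ _ _ _ hkshape hiN (by omega)]
      by_cases hab : a = i' + 2 ∧ b = 0
      · rw [if_pos hab, if_pos ⟨hab.1, by omega⟩, hab.2]
        rw [hrow']
        show g (i'+1) 1 = g (i'+2) 0
        rw [g]
        simp
      · rw [if_neg hab, hk]
        split_ifs with h1 h2 <;> first | rfl | omega
    · rw [if_neg hk0, get2_set2 N _ _ _ _ hkshape hiN (by omega)]
      by_cases hab : a = i' + 2 ∧ b = k
      · rw [if_pos hab, if_pos ⟨hab.1, by omega⟩, hab.2]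
        rw [hrow', hrow']
        show g (i'+1) (k-1) + g (i'+1) (k+1) = g (i'+2) k
        rw [g]
        rw [if_neg hk0, if_pos (by omega)]
      · rw [if_neg hab, hk]
        split_ifs with h1 h2 <;> first | rfl | omega

theorem outerFold (N : Nat) (hN : 1 ≤ N) (m : Nat) (hm : m ≤ N - 1)
    (dp : List (List Int)) (hsh : Shape N dp)
    (hdp : ∀ a b, get2 dp a b = if 1 ≤ a ∧ a ≤ 1 then g a b else 0) (a b : Nat) :
    get2 ((List.range' 2 m).foldl
      (fun dp i =>
        (List.range 26).foldl
          (fun dp j =>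
            if j = 0 then set2 dp i j (get2 dp (i-1) (j+1))
            else set2 dp i j (get2 dp (i-1) (j-1) + get2 dp (i-1) (j+1)))
          dp) dp) a b
      = if 1 ≤ a ∧ a ≤ m + 1 then g a b else 0 := by
  induction m generalizing a b with
  | zero => exact hdp a b
  | succ k ih =>
    rw [List.range'_concat, List.foldl_append]
    simp only [List.foldl_cons, List.foldl_nil]
    set dpk := (List.range' 2 k).foldl
      (fun dp i =>
        (List.range 26).foldl
          (fun dp j =>
            if j = 0 then set2 dp i j (get2 dp (i-1) (j+1))
            else set2 dp i j (get2 dp (i-1) (j-1) + get2 dp (i-1) (j+1)))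
          dp) dp with hdpk
    have hkshape : Shape N dpk := by
      rw [hdpk]
      refine foldl_pres _ _ _ (fun dp i h => ?_) dp hsh
      refine foldl_pres _ _ _ (fun dp j h => ?_) dp h
      split_ifs <;> exact shape_set2 N dp i j _ h
    have hkinv : ∀ a b, get2 dpk a b = if 1 ≤ a ∧ a ≤ k + 1 then g a b else 0 :=
      fun a b => ih (by omega) a b
    rw [innerFold N (2 + 1*k) (by omega) (by omega) dpk hkshape
      (fun b => by rw [hkinv, if_pos (by omega)]) 26 (by omega)]
    by_cases hab : a = 2 + 1*k ∧ b < 26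
    · rw [if_pos hab, if_pos (by omega), hab.1]
    · rw [if_neg hab, hkinv]
      by_cases ha : a = 2 + 1*k
      · have hb : 26 ≤ b := by omega
        rw [if_neg (by omega), if_pos (by omega), g_ge26 a b hb]
      · split_ifs with h1 h2 <;> first | rfl | omega

theorem foldl_add_int (m : Nat) (f : Nat → Int) (c : Int) :
    (List.range m).foldl (fun s i => s + f i) c = c + ∑ i ∈ Finset.range m, f i := by
  induction m generalizing c with
  | zero => simp
  | succ k ih =>
    rw [List.range_succ, List.foldl_append]
    simp only [List.foldl_cons, List.foldl_nil]
    rw [ih, Finset.sum_range_succ]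
    ring

-- ===== VERDICT (by name: the statement is the Claim_ definition above) =====
theorem countStrs_spec : Claim_equal_countStrs := by
  intro n _ hn
  unfold Pre_countStrs at hn
  unfold Spec_countStrs countStrs countStrs_alt
  simp only []
  have hN1 : 1 ≤ n.toNat := by omega
  have hshape0 : Shape n.toNat (List.replicate (n.toNat+1) (List.replicate 27 (0:Int))) := by
    constructor
    · simp
    · intro a ha
      rw [List.getD_eq_getElem?_getD, List.getElem?_replicate]
      rw [if_pos (by omega)]
      simp
  have hrepz : ∀ (m b : Nat), (List.replicate m (0:Int)).getD b 0 = 0 := by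
    intro m b
    rw [List.getD_eq_getElem?_getD, List.getElem?_replicate]
    split_ifs <;> rfl
  have hget0 : ∀ a b, get2 (List.replicate (n.toNat+1) (List.replicate 27 (0:Int))) a b = 0 := by
    intro a b
    unfold get2
    have hrow : (List.replicate (n.toNat+1) (List.replicate 27 (0:Int))).getD a [] =
        if a < n.toNat+1 then List.replicate 27 0 else [] := by
      rw [List.getD_eq_getElem?_getD, List.getElem?_replicate]
      split_ifs <;> rfl
    rw [hrow]
    split_ifs with h
    · exact hrepz 27 b
    · rfl
  have hinitshape : Shape n.toNat ((List.range 26).foldl (fun dp i => set2 dp 1 i 1)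
      (List.replicate (n.toNat+1) (List.replicate 27 (0:Int)))) :=
    foldl_pres _ _ _ (fun dp x h => shape_set2 _ dp 1 x 1 h) _ hshape0
  have hinit : ∀ a b, get2 ((List.range 26).foldl (fun dp i => set2 dp 1 i 1)
      (List.replicate (n.toNat+1) (List.replicate 27 (0:Int)))) a b
      = if 1 ≤ a ∧ a ≤ 1 then g a b else 0 := by
    intro a b
    rw [initFold n.toNat 26 (by omega) _ hshape0 hN1]
    rw [hget0]
    by_cases ha : a = 1
    · subst ha
      by_cases hb : b < 26
      · rw [if_pos ⟨rfl, hb⟩, if_pos (by omega)]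
        show (1:Int) = g 1 b
        rw [g, if_pos hb]
      · rw [if_neg (by omega), if_pos (by omega)]
        show (0:Int) = g 1 b
        rw [g, if_neg hb]
    · rw [if_neg (by omega), if_neg (by omega)]
  have houter := fun a b => outerFold n.toNat hN1 (n.toNat - 1) (by omega) _ hinitshape hinit a b
  rw [foldl_add_int]
  have hA : ∀ i ∈ Finset.range 26,
      get2 ((List.range' 2 (n.toNat - 1)).foldl
        (fun dp i =>
          (List.range 26).foldl
            (fun dp j =>
              if j = 0 then set2 dp i j (get2 dp (i-1) (j+1))
              else set2 dp i j (get2 dp (i-1) (j-1) + get2 dp (i-1) (j+1)))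
            dp)
        ((List.range 26).foldl (fun dp i => set2 dp 1 i 1)
          (List.replicate (n.toNat+1) (List.replicate 27 (0:Int))))) n.toNat i
      = g n.toNat i := by
    intro i _
    rw [houter, if_pos (by omega)]
  rw [Finset.sum_congr rfl hA, zero_add]
  rw [powLoop_eq, ones_eq, rows_eq, sum_map_range]
  have : (n-1).toNat + 1 = n.toNat := by omega
  rw [this]
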